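-- pv_equiv track=rewrite | github.com/adennng/stock_strategy_lab | src/strategy_lab/agents/signal_agent.py | _visible_len
-- ===== SOURCE A (Python) =====
-- def _visible_len(text: str) -> int:
--     result = 0
--     in_tag = False
--     for char in text:
--         if char == "[":
--             in_tag = True
--             continue
--         if char == "]" and in_tag:
--             in_tag = False
--             continue
--         if not in_tag:
--             result += 1
--     return result
-- ===== SOURCE B (Python) =====
-- def _visible_len(text: str) -> int:
--     head, sep, tail = text.partition('[')
--     if not sep:
--         return len(text)
--     _, sep2, rest = tail.partition(']')
--     if not sep2:
--         return len(head)
--     return len(head) + _visible_len(rest)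
-- ===== Notes on version B (the rewrite author's own statement) =====
-- stated objective: idiomatic
-- what changed: Replaced the character-by-character in_tag state machine with a recursive span decomposition: split off the text before the next '[' with str.partition, skip to the matching ']' with another partition, and recurse on the remainder.
import Mathlib
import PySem

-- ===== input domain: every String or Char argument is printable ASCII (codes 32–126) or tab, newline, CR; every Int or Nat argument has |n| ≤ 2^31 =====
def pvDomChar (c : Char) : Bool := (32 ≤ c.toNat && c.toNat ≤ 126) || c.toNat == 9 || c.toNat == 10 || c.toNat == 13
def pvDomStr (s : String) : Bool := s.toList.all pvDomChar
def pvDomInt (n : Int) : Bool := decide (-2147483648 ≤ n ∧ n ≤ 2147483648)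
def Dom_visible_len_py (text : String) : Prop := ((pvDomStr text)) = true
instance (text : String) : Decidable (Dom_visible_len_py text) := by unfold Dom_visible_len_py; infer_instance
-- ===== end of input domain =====

-- B replaces A's per-character in_tag state machine by a recursive span split via str.partition (idiomatic; same cost).


-- ===== PORT A =====
-- A's loop over the characters with state (result, in_tag), branches in source order.
def visible_len_py (text : String) : Int :=
  (text.toList.foldl
    (fun (st : Int × Bool) c =>
      if c = '[' then (st.1, true)
      else if c = ']' ∧ st.2 then (st.1, false)
      else if st.2 = false then (st.1 + 1, st.2)
      else st)
    (0, false)).1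

-- ===== PORT B =====
-- text.partition(sep) for the single-char seps '[' / ']' is hand-ported exactly:
-- head = takeWhile (≠ sep), sep found ↔ dropWhile (≠ sep) ≠ [], tail = (dropWhile (≠ sep)).tail.
def visibleLenAltChars (l : List Char) : Int :=
  match h : l.dropWhile (· ≠ '[') with
  | [] => (l.length : Int)                                   -- no '[': return len(text)
  | _ :: tail =>
    match h2 : tail.dropWhile (· ≠ ']') with
    | [] => ((l.takeWhile (· ≠ '[')).length : Int)           -- no ']': return len(head)
    | _ :: rest => ((l.takeWhile (· ≠ '[')).length : Int) + visibleLenAltChars rest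
termination_by l.length
decreasing_by
  have h1 : (l.takeWhile (· ≠ '[')).length + (l.dropWhile (· ≠ '[')).length = l.length := by
    rw [← List.length_append, List.takeWhile_append_dropWhile]
  have h3 : (tail.dropWhile (· ≠ ']')).length ≤ tail.length := by
    simpa using List.length_dropWhile_le (p := (· ≠ ']')) (l := tail)
  simp only [h] at h1
  simp_all
  omega

def visible_len_py_alt (text : String) : Int :=
  visibleLenAltChars text.toList

-- ===== PRECONDITION & SPEC =====
def Spec_visible_len_py (text : String) (out : Int) : Prop := out = visible_len_py_alt text
instance (text : String) (out : Int) : Decidable (Spec_visible_len_py text out) := by unfold Spec_visible_len_py; infer_instance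

-- ===== CLAIM (what is proved, stated in full; the proofs are below) =====
def Claim_equal_visible_len_py : Prop := ∀ (text : String), Dom_visible_len_py text → Spec_visible_len_py text (visible_len_py text)

-- ===== LEMMAS AND PROOFS =====

-- State-indexed characterisation of A's loop: gF = count still to come when not inside a tag, gT when inside one.
mutual
def gF : List Char → Int
  | [] => 0
  | c :: t => if c = '[' then gT t else 1 + gF t
def gT : List Char → Int
  | [] => 0
  | c :: t => if c = ']' then gF t else gT t
end

theorem foldA_spec (l : List Char) : ∀ (r : Int) (b : Bool),
    (l.foldl
      (fun (st : Int × Bool) c =>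
        if c = '[' then (st.1, true)
        else if c = ']' ∧ st.2 then (st.1, false)
        else if st.2 = false then (st.1 + 1, st.2)
        else st)
      (r, b)).1 = r + (if b then gT l else gF l) := by
  induction l with
  | nil => intro r b; simp [gF, gT]
  | cons c t ih =>
    intro r b
    by_cases hc : c = '['
    · cases b <;> simp [List.foldl_cons, hc, ih, gF, gT]
    · by_cases hc2 : c = ']'
      · cases b <;> simp [List.foldl_cons, hc, hc2, ih, gF, gT] <;> ring
      · cases b <;> simp [List.foldl_cons, hc, hc2, ih, gF, gT] <;> ring

theorem gF_split (l : List Char) :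
    gF l = ((l.takeWhile (· ≠ '[')).length : Int) +
      (match l.dropWhile (· ≠ '[') with
       | [] => 0
       | _ :: t => gT t) := by
  induction l with
  | nil => simp [gF]
  | cons c t ih =>
    by_cases hc : c = '['
    · simp [gF, hc]
    · rw [gF]
      simp only [List.takeWhile_cons, List.dropWhile_cons]
      simp only [hc, decide_not]
      simp [ih]
      cases h : t.dropWhile (· ≠ '[') with
      | nil => simp at *; omega
      | cons a b => simp [h] at *; omega

theorem gT_split (l : List Char) :
    gT l = (match l.dropWhile (· ≠ ']') with
            | [] => 0
            | _ :: t => gF t) := by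
  induction l with
  | nil => simp [gT]
  | cons c t ih =>
    by_cases hc : c = ']'
    · simp [gT, hc]
    · simp [gT, hc, ih]

theorem alt_eq_gF (l : List Char) : visibleLenAltChars l = gF l := by
  induction l using visibleLenAltChars.induct with
  | case1 l h =>
    rw [visibleLenAltChars]
    split
    · have ht : l.takeWhile (· ≠ '[') = l := by
        conv_rhs => rw [← List.takeWhile_append_dropWhile (p := (· ≠ '[')) (l := l)]
        rw [h, List.append_nil]
      rw [gF_split l, h, ht]
      simp
    · next heq => rw [h] at heq; exact absurd heq (by simp)
  | case2 l hd tail h h2 =>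
    rw [visibleLenAltChars]
    split
    · next heq => rw [h] at heq; exact absurd heq (by simp)
    · next a b heq =>
      rw [h] at heq; cases heq
      split
      · rw [gF_split l, h]
        show ((l.takeWhile (· ≠ '[')).length : Int) = ((l.takeWhile (· ≠ '[')).length : Int) + gT tail
        rw [gT_split tail, h2]
        simp
      · next a2 b2 heq2 => rw [h2] at heq2; exact absurd heq2 (by simp)
  | case3 l hd tail h hd2 rest h2 ih =>
    rw [visibleLenAltChars]
    split
    · next heq => rw [h] at heq; exact absurd heq (by simp)
    · next a b heq =>
      rw [h] at heq; cases heq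
      split
      · next heq2 => rw [h2] at heq2; exact absurd heq2 (by simp)
      · next a2 b2 heq2 =>
        rw [h2] at heq2; cases heq2
        rw [gF_split l, h]
        show ((l.takeWhile (· ≠ '[')).length : Int) + visibleLenAltChars rest =
          ((l.takeWhile (· ≠ '[')).length : Int) + gT tail
        rw [gT_split tail, h2, ih]

-- ===== VERDICT (by name: the statement is the Claim_ definition above) =====
theorem visible_len_py_spec : Claim_equal_visible_len_py := by
  intro text _
  unfold Spec_visible_len_py visible_len_py visible_len_py_alt
  rw [foldA_spec, alt_eq_gF]
  simp
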